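-- pv_equiv track=rewrite | github.com/daniel-reich/ubiquitous-fiesta | dBBhtQqKZb2eDERHg_3.py | numberSequence
-- ===== SOURCE A (Python) =====
-- import math
--
-- def numberSequence(n):
--     res=[]
--     if n<=0:
--         return '-1'
--     else:
--         if n%2!=0:
--             n=math.ceil(n/2)
--             x=[str(i) for i in range(1,n+1)]
--             a=x[::-1]+x[1:]
--             b=[str(x) for x in a]
--             return str(" ".join(b))
--         if n%2==0:
--             n=math.ceil(n/2)
--             x=[str(i) for i in range(1,n+1)]
--             a=x[::-1]+x
--             b=[str(x) for x in a]
--             return str(" ".join(b))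
-- ===== SOURCE B (Python) =====
-- def numberSequence(n):
--     if n <= 0:
--         return '-1'
--     m = (n + 1) // 2
--     if n % 2 != 0:
--         terms = [abs(i - (m - 1)) + 1 for i in range(n)]
--     else:
--         terms = [m - i if i < m else i - m + 1 for i in range(n)]
--     return ' '.join(str(t) for t in terms)
-- ===== Notes on version B (the rewrite author's own statement) =====
-- stated objective: alternative
-- what changed: Replaces building an ascending string list, reversing and splicing it, with a single pass over range(n) computing each term by a closed-form absolute-value/branch formula per index.
import Mathlib
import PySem

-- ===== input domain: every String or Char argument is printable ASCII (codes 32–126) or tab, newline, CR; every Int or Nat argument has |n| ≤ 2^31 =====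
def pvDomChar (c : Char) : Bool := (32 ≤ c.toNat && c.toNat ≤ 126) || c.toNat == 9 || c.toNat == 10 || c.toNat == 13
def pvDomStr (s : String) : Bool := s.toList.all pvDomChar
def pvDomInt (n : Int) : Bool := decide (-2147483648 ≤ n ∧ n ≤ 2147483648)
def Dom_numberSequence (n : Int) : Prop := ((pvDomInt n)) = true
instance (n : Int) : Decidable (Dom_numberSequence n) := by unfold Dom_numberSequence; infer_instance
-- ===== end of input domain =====

-- B replaces A's build-ascending-list / reverse / splice construction by a one-pass per-index
-- closed-form term formula; same O(n) cost, different algorithm (objective: alternative).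

-- ===== PORT A =====
-- math.ceil(n/2) is exact as (n+1)//2 here: |n| ≤ 2^31 so n/2 is an exact float.
-- x[::-1] is List.reverse (PySem.List.slice?_none_none_neg_one); x[1:] is .tail (slice_from_one).
-- b = [str(x) for x in a]: str of a str is the identity, so b = a.
def numberSequence (n : Int) : String :=
  if n ≤ 0 then "-1"
  else if PySem.Int.mod n 2 ≠ 0 then
    let m := PySem.Int.floordiv (n + 1) 2
    let x := (PySem.List.pyRange 1 (m + 1) 1).map PySem.Int.toStr
    let a := x.reverse ++ x.tail
    let b := a
    PySem.Str.join " " b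
  else
    let m := PySem.Int.floordiv (n + 1) 2
    let x := (PySem.List.pyRange 1 (m + 1) 1).map PySem.Int.toStr
    let a := x.reverse ++ x
    let b := a
    PySem.Str.join " " b

-- ===== PORT B =====
def numberSequence_alt (n : Int) : String :=
  if n ≤ 0 then "-1"
  else
    let m := PySem.Int.floordiv (n + 1) 2
    let terms : List Int :=
      if PySem.Int.mod n 2 ≠ 0 then
        (PySem.List.pyRange 0 n 1).map (fun i => ((i - (m - 1)).natAbs : Int) + 1)
      else
        (PySem.List.pyRange 0 n 1).map (fun i => if i < m then m - i else i - m + 1)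
    PySem.Str.join " " (terms.map PySem.Int.toStr)

-- ===== PRECONDITION & SPEC =====
def Spec_numberSequence (n : Int) (out : String) : Prop := out = numberSequence_alt n
instance (n : Int) (out : String) : Decidable (Spec_numberSequence n out) := by unfold Spec_numberSequence; infer_instance

-- ===== CLAIM (what is proved, stated in full; the proofs are below) =====
def Claim_equal_numberSequence : Prop := ∀ (n : Int), Dom_numberSequence n → Spec_numberSequence n (numberSequence n)

-- ===== LEMMAS AND PROOFS =====

-- the underlying Int lists coincide, odd case: range is [1..m]
lemma key_odd (m : Int) (hm : 1 ≤ m) :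
    (PySem.List.pyRange 1 (m + 1) 1).reverse ++ (PySem.List.pyRange 1 (m + 1) 1).tail
      = (PySem.List.pyRange 0 (2 * m - 1) 1).map (fun i => ((i - (m - 1)).natAbs : Int) + 1) := by
  lift m to ℕ using (by omega : (0:Int) ≤ m)
  rw [PySem.List.pyRange_one 1 ((m:Int) + 1), PySem.List.pyRange_one 0 (2 * (m:Int) - 1)]
  rw [show ((m:Int) + 1 - 1).toNat = m from by omega,
      show ((2 * (m:Int) - 1 - 0)).toNat = 2 * m - 1 from by omega]
  apply List.ext_getElem
  · simp; omega
  · intro k h1 h2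
    simp only [List.getElem_append, List.getElem_reverse, List.getElem_tail, List.getElem_map,
      List.getElem_range, List.length_reverse, List.length_map, List.length_range]
    split_ifs with h
    · omega
    · omega

-- even case: range is [1..m]
lemma key_even (m : Int) (hm : 1 ≤ m) :
    (PySem.List.pyRange 1 (m + 1) 1).reverse ++ (PySem.List.pyRange 1 (m + 1) 1)
      = (PySem.List.pyRange 0 (2 * m) 1).map (fun i => if i < m then m - i else i - m + 1) := by
  lift m to ℕ using (by omega : (0:Int) ≤ m)
  rw [PySem.List.pyRange_one 1 ((m:Int) + 1), PySem.List.pyRange_one 0 (2 * (m:Int))]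
  rw [show ((m:Int) + 1 - 1).toNat = m from by omega,
      show ((2 * (m:Int) - 0)).toNat = 2 * m from by omega]
  apply List.ext_getElem
  · simp; omega
  · intro k h1 h2
    simp only [List.getElem_append, List.getElem_reverse, List.getElem_map,
      List.getElem_range, List.length_reverse, List.length_map, List.length_range]
    split_ifs with h h2' h3
    all_goals omega

-- ===== VERDICT (by name: the statement is the Claim_ definition above) =====
theorem numberSequence_spec : Claim_equal_numberSequence := by
  intro n _
  unfold Spec_numberSequence numberSequence numberSequence_alt
  by_cases hle : n ≤ 0
  · simp [hle]
  · rw [if_neg hle, if_neg hle]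
    rw [PySem.Int.floordiv_eq_ediv_of_pos (by omega : (0:Int) < 2)]
    rw [PySem.Int.mod_eq_emod_of_pos (by omega : (0:Int) < 2)]
    by_cases hodd : n % 2 ≠ 0
    · simp only [if_pos hodd]
      obtain ⟨m, rfl⟩ : ∃ m : Int, n = 2 * m - 1 := ⟨(n + 1) / 2, by omega⟩
      have hm1 : (2 * m - 1 + 1) / 2 = m := by omega
      have hm : 1 ≤ m := by omega
      rw [hm1]
      congr 1
      rw [← key_odd m hm]
      simp [List.map_append, List.map_reverse]
    · simp only [if_neg hodd]
      obtain ⟨m, rfl⟩ : ∃ m : Int, n = 2 * m := ⟨n / 2, by omega⟩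
      have hm1 : (2 * m + 1) / 2 = m := by omega
      have hm : 1 ≤ m := by omega
      rw [hm1]
      congr 1
      rw [← key_even m hm]
      simp [List.map_append, List.map_reverse]
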